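-- pv_equiv track=rewrite | github.com/Rafael2408/trabajo3-analisis-algoritmos | trabajo3.py | plus_multiple_digits
-- ===== SOURCE A (Python) =====
-- def plus_multiple_digits(A, multiple, i, B = None):
--     if B is None:
--         B = []
--     if(i<0):
--         return B
--     sum = 0
--     for digit in str(A[i]):
--         if int(digit) % multiple == 0:
--             sum += int(digit)
--     B.append(sum)
--     return plus_multiple_digits(A, multiple, i-1, B)
-- ===== SOURCE B (Python) =====
-- def plus_multiple_digits(A, multiple, i, B=None):
--     if B is None:
--         B = []
--     for idx in range(i, -1, -1):
--         n = A[idx]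
--         s = 0
--         while n > 0:
--             d = n % 10
--             if d % multiple == 0:
--                 s += d
--             n //= 10
--         B.append(s)
--     return B
-- ===== Notes on version B (the rewrite author's own statement) =====
-- stated objective: alternative
-- what changed: Replaced A's tail recursion over i and its str()/int() per-character digit parsing by an iterative range(i,-1,-1) loop that extracts digits arithmetically with % 10 and // 10.
import Mathlib
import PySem

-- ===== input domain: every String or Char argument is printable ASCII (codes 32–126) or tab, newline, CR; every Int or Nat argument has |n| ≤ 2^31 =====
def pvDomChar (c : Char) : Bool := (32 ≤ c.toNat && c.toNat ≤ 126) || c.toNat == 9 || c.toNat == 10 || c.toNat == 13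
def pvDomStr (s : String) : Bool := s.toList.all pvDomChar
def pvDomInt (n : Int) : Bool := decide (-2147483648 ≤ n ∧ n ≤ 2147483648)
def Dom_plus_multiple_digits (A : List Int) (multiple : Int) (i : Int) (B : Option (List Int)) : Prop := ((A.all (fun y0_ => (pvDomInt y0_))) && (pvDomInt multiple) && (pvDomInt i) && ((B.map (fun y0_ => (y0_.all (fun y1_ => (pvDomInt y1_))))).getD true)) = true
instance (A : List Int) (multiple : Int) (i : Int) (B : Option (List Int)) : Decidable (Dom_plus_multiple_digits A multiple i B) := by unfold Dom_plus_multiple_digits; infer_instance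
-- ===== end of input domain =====

-- B replaces A's recursion + str()/int() digit parsing by an iterative loop with arithmetic
-- digit extraction (% 10, // 10); same return value and the same in-place growth of a
-- caller-supplied B (equivalence proved about the return value).

-- ===== PORT A =====
-- sum of the digits of str(n) that are divisible by multiple (A's inner for-loop)
def pmdDigitSumA (multiple : Int) (n : Int) : Int :=
  (PySem.Int.toChars n).foldl
    (fun s c =>
      let d := (PySem.Int.ofChars? [c]).getD 0   -- int(digit); never none inside Pre_
      if PySem.Int.mod d multiple = 0 then s + d else s) 0

-- A's tail recursion over i, i-1, …; acc is the (already-defaulted) list B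
def pmdRecA (A : List Int) (multiple : Int) (i : Int) (acc : List Int) : List Int :=
  if i < 0 then acc
  else pmdRecA A multiple (i - 1)
        (acc ++ [pmdDigitSumA multiple ((PySem.List.pyGet? A i).getD 0)])  -- A[i]; some inside Pre_
termination_by (i + 1).toNat
decreasing_by omega

def plus_multiple_digits (A : List Int) (multiple : Int) (i : Int) (B : Option (List Int)) : List Int :=
  pmdRecA A multiple i (B.getD [])

-- ===== PORT B =====
-- Source B's while-loop: peel digits of n arithmetically, accumulating into s
def pmdDigitLoopB (multiple : Int) (n : Int) (s : Int) : Int :=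
  if h : 0 < n then
    let d := PySem.Int.mod n 10
    pmdDigitLoopB multiple (PySem.Int.floordiv n 10)
      (if PySem.Int.mod d multiple = 0 then s + d else s)
  else s
termination_by n.toNat
decreasing_by
  have h10 : PySem.Int.floordiv n 10 = n / 10 := PySem.Int.floordiv_eq_ediv_of_pos (by norm_num)
  rw [h10]; omega

def plus_multiple_digits_alt (A : List Int) (multiple : Int) (i : Int) (B : Option (List Int)) : List Int :=
  (PySem.List.pyRange i (-1) (-1)).foldl
    (fun acc idx => acc ++ [pmdDigitLoopB multiple ((PySem.List.pyGet? A idx).getD 0) 0])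
    (B.getD [])

-- ===== PRECONDITION & SPEC =====
-- Pre_ excludes exactly the inputs where the Python A raises (all only reachable when 0 ≤ i):
-- multiple = 0 (ZeroDivisionError in int(digit) % multiple), i ≥ len(A) (IndexError), and a
-- negative element among A[0..i] (int('-') raises ValueError).
def Pre_plus_multiple_digits (A : List Int) (multiple : Int) (i : Int) (B : Option (List Int)) : Prop :=
  0 ≤ i → multiple ≠ 0 ∧ i < A.length ∧ ∀ x ∈ A.take (i.toNat + 1), 0 ≤ x
instance (A : List Int) (multiple : Int) (i : Int) (B : Option (List Int)) : Decidable (Pre_plus_multiple_digits A multiple i B) := by unfold Pre_plus_multiple_digits; infer_instance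

def pvWitness_plus_multiple_digits : List Int × Int × Int × Option (List Int) := ([12, 305], 3, 1, none)

def Spec_plus_multiple_digits (A : List Int) (multiple : Int) (i : Int) (B : Option (List Int)) (out : List Int) : Prop := out = plus_multiple_digits_alt A multiple i B
instance (A : List Int) (multiple : Int) (i : Int) (B : Option (List Int)) (out : List Int) : Decidable (Spec_plus_multiple_digits A multiple i B out) := by unfold Spec_plus_multiple_digits; infer_instance

-- ===== CLAIM (what is proved, stated in full; the proofs are below) =====
def Claim_equal_plus_multiple_digits : Prop := ∀ (A : List Int) (multiple : Int) (i : Int) (B : Option (List Int)), Dom_plus_multiple_digits A multiple i B → Pre_plus_multiple_digits A multiple i B → Spec_plus_multiple_digits A multiple i B (plus_multiple_digits A multiple i B)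

-- ===== LEMMAS AND PROOFS =====

-- the contribution of one character of str(A[i]) to A's sum
def pmdContrib (multiple : Int) (c : Char) : Int :=
  if PySem.Int.mod ((PySem.Int.ofChars? [c]).getD 0) multiple = 0
  then (PySem.Int.ofChars? [c]).getD 0 else 0

-- digit sum of a Nat by the same condition, following toDigitsCore's stopping rule
def pmdNatSum (multiple : Int) (n : Nat) : Int :=
  (if PySem.Int.mod ((n % 10 : Nat) : Int) multiple = 0 then ((n % 10 : Nat) : Int) else 0) +
  (if h : n / 10 = 0 then 0 else pmdNatSum multiple (n / 10))
decreasing_by omega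

lemma pmd_parse_digitChar (d : Nat) (hd : d < 10) :
    (PySem.Int.ofChars? [Nat.digitChar d]).getD 0 = (d : Int) := by
  interval_cases d <;> decide

lemma pmd_foldlA_eq (multiple : Int) (cs : List Char) (s : Int) :
    cs.foldl (fun s c =>
      let d := (PySem.Int.ofChars? [c]).getD 0
      if PySem.Int.mod d multiple = 0 then s + d else s) s
      = s + (cs.map (pmdContrib multiple)).sum := by
  induction cs generalizing s with
  | nil => simp
  | cons c cs ih =>
    simp only [List.foldl_cons, List.map_cons, List.sum_cons, ih, pmdContrib]
    split_ifs <;> ring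

lemma pmd_core_succ (b fuel n : Nat) (ds : List Char) :
    Nat.toDigitsCore b (fuel + 1) n ds =
      if n / b = 0 then (n % b).digitChar :: ds
      else Nat.toDigitsCore b fuel (n / b) ((n % b).digitChar :: ds) := by
  rfl

lemma pmdNatSum_zero (multiple : Int) : pmdNatSum multiple 0 = 0 := by
  rw [pmdNatSum]; norm_num

lemma pmdNatSum_step (multiple : Int) (n : Nat) :
    pmdNatSum multiple n =
      (if PySem.Int.mod ((n % 10 : Nat) : Int) multiple = 0 then ((n % 10 : Nat) : Int) else 0) +
      pmdNatSum multiple (n / 10) := by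
  rw [pmdNatSum]
  by_cases h : n / 10 = 0
  · rw [dif_pos h, h, pmdNatSum_zero]
  · rw [dif_neg h]

lemma pmd_contrib_digitChar (multiple : Int) (d : Nat) (hd : d < 10) :
    pmdContrib multiple (Nat.digitChar d) =
      (if PySem.Int.mod (d : Int) multiple = 0 then (d : Int) else 0) := by
  rw [pmdContrib, pmd_parse_digitChar d hd]

lemma pmd_toDigitsCore_sum (multiple : Int) :
    ∀ (fuel n : Nat) (ds : List Char), n ≤ fuel + 1 →
      ((Nat.toDigitsCore 10 (fuel + 1) n ds).map (pmdContrib multiple)).sum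
        = pmdNatSum multiple n + (ds.map (pmdContrib multiple)).sum := by
  intro fuel
  induction fuel with
  | zero =>
    intro n ds hn
    have h : n / 10 = 0 := by omega
    rw [pmd_core_succ, if_pos h]
    simp only [List.map_cons, List.sum_cons,
      pmd_contrib_digitChar multiple _ (Nat.mod_lt _ (by norm_num))]
    rw [pmdNatSum_step multiple n, h, pmdNatSum_zero]
    ring
  | succ fuel ih =>
    intro n ds hn
    rw [pmd_core_succ]
    by_cases h : n / 10 = 0
    · rw [if_pos h]
      simp only [List.map_cons, List.sum_cons,
        pmd_contrib_digitChar multiple _ (Nat.mod_lt _ (by norm_num))]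
      rw [pmdNatSum_step multiple n, h, pmdNatSum_zero]
      ring
    · rw [if_neg h, ih (n / 10) _ (by omega)]
      simp only [List.map_cons, List.sum_cons,
        pmd_contrib_digitChar multiple _ (Nat.mod_lt _ (by norm_num))]
      rw [pmdNatSum_step multiple n]
      ring

lemma pmd_sumA_eq_natSum (multiple : Int) (n : Int) (hn : 0 ≤ n) :
    pmdDigitSumA multiple n = pmdNatSum multiple n.toNat := by
  rw [pmdDigitSumA, pmd_foldlA_eq, PySem.Int.toChars, if_neg (by omega), Nat.toDigits,
    pmd_toDigitsCore_sum multiple n.toNat n.toNat [] (by omega)]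
  simp

lemma pmd_loopB_eq_natSum (multiple : Int) :
    ∀ (m : Nat) (s : Int), pmdDigitLoopB multiple (m : Int) s = s + pmdNatSum multiple m := by
  intro m
  induction m using Nat.strong_induction_on with
  | _ m ih =>
    intro s
    rw [pmdDigitLoopB]
    by_cases hm : 0 < (m : Int)
    · rw [dif_pos hm]
      have hmod : PySem.Int.mod (m : Int) 10 = ((m % 10 : Nat) : Int) := by
        exact_mod_cast PySem.Int.mod_natCast m 10
      have hdiv : PySem.Int.floordiv (m : Int) 10 = ((m / 10 : Nat) : Int) := by
        exact_mod_cast PySem.Int.floordiv_natCast m 10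
      rw [hmod, hdiv, ih (m / 10) (by omega), pmdNatSum_step multiple m]
      split_ifs <;> ring
    · rw [dif_neg hm]
      have : m = 0 := by omega
      subst this
      rw [pmdNatSum_zero]
      ring

lemma pmd_sumA_eq_loopB (multiple : Int) (n : Int) (hn : 0 ≤ n) :
    pmdDigitSumA multiple n = pmdDigitLoopB multiple n 0 := by
  obtain ⟨m, rfl⟩ := Int.eq_ofNat_of_zero_le hn
  rw [pmd_sumA_eq_natSum multiple _ (by positivity), pmd_loopB_eq_natSum, Int.toNat_natCast,
    zero_add]

lemma pmd_outer (A : List Int) (multiple : Int) :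
    ∀ (k : Nat) (i : Int), i < (k : Int) →
      (0 ≤ i → i < A.length ∧ ∀ x ∈ A.take (i.toNat + 1), 0 ≤ x) →
      ∀ acc : List Int,
      pmdRecA A multiple i acc
        = (PySem.List.pyRange i (-1) (-1)).foldl
            (fun acc idx => acc ++ [pmdDigitLoopB multiple ((PySem.List.pyGet? A idx).getD 0) 0])
            acc := by
  intro k
  induction k with
  | zero => intro i hi _ acc; rw [pmdRecA, if_pos (by omega),
      PySem.List.pyRange_neg_one_eq_nil (by omega), List.foldl_nil]
  | succ k ih =>
    intro i hi hpre acc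
    by_cases hneg : i < 0
    · rw [pmdRecA, if_pos hneg, PySem.List.pyRange_neg_one_eq_nil (by omega), List.foldl_nil]
    · obtain ⟨hlen, htake⟩ := hpre (by omega)
      have hget : (PySem.List.pyGet? A i).getD 0 = A[i.toNat]'(by omega) := by
        simp only [PySem.List.pyGet?, PySem.List.pyIdx?, if_pos (by omega : (0:Int) ≤ i),
          if_pos (by omega : i < (A.length : Int)), Option.bind_some]
        rw [List.getElem?_eq_getElem (by omega : i.toNat < A.length)]
        rfl
      have hx : (0 : Int) ≤ A[i.toNat]'(by omega) := by
        apply htake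
        have h1 : i.toNat < (A.take (i.toNat + 1)).length := by
          simp [List.length_take]; omega
        have := List.getElem_mem h1
        rwa [List.getElem_take] at this
      rw [pmdRecA, if_neg hneg,
        PySem.List.pyRange_neg_one_cons (by omega : (-1 : Int) < i), List.foldl_cons, hget,
        ← pmd_sumA_eq_loopB multiple _ hx, ← hget,
        ih (i - 1) (by omega) ?_ _]
      intro hpos
      refine ⟨by omega, fun x hxmem => htake x ?_⟩
      have hsub : A.take ((i - 1).toNat + 1) <+: A.take (i.toNat + 1) :=
        List.take_prefix_take_left (by omega)
      exact hsub.subset hxmem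

-- ===== VERDICT (by name: the statement is the Claim_ definition above) =====
theorem plus_multiple_digits_spec : Claim_equal_plus_multiple_digits := by
  intro A multiple i B _ hpre
  unfold Spec_plus_multiple_digits plus_multiple_digits plus_multiple_digits_alt
  exact pmd_outer A multiple (i.toNat + 1) i (by omega)
    (fun hpos => ⟨(hpre hpos).2.1, (hpre hpos).2.2⟩) (B.getD [])
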